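-- pv_equiv track=rewrite | github.com/JavonDavis/Competive-Programming-Python | hackerrank/algorithms/greedy/easy/marcs_cakewalk/solution.py | optimal_miles
-- ===== SOURCE A (Python) =====
-- def optimal_miles(calories): # Assumes calories is sorted
--     j = 0
--     i = 0
--     miles = 0
--     while i < len(calories):
--         miles += (pow(2, j) * calories[i])
--         i += 1
--         j += 1
--     return miles
-- ===== SOURCE B (Python) =====
-- def optimal_miles(calories):
--     result = 0
--     for c in reversed(calories):
--         result = result * 2 + c
--     return result
-- ===== Notes on version B (the rewrite author's own statement) =====
-- stated objective: faster
-- what changed: Replaced the forward index loop computing pow(2, j) for each element with a Horner scheme: a single accumulator doubled while traversing the list in reverse, no indexing and no pow.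
import Mathlib
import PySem

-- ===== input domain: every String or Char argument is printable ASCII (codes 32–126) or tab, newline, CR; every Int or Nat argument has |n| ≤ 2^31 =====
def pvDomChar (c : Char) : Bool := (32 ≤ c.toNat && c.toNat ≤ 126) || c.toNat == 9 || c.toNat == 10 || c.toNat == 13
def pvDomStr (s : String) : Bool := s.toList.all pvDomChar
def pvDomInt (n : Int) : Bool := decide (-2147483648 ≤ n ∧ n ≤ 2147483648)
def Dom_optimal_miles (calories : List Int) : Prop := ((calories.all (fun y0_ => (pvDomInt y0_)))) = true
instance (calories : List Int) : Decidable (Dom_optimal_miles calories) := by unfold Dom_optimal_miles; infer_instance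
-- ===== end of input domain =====

-- B replaces the pow(2,j) forward index loop with a Horner scheme over the reversed list (objective: simpler).
-- ===== PORT A =====
-- while loop over i with counter j and accumulator miles, transliterated as recursion on the list
def pvLoopA : List Int → Nat → Int → Int
  | [], _, miles => miles
  | c :: rest, j, miles => pvLoopA rest (j + 1) (miles + 2 ^ j * c)

def optimal_miles (calories : List Int) : Int := pvLoopA calories 0 0

-- ===== PORT B =====
def optimal_miles_alt (calories : List Int) : Int :=
  calories.reverse.foldl (fun result c => result * 2 + c) 0

-- ===== PRECONDITION & SPEC =====
def Spec_optimal_miles (calories : List Int) (out : Int) : Prop := out = optimal_miles_alt calories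
instance (calories : List Int) (out : Int) : Decidable (Spec_optimal_miles calories out) := by unfold Spec_optimal_miles; infer_instance

-- ===== CLAIM (what is proved, stated in full; the proofs are below) =====
def Claim_equal_optimal_miles : Prop := ∀ (calories : List Int), Dom_optimal_miles calories → Spec_optimal_miles calories (optimal_miles calories)

-- ===== LEMMAS AND PROOFS =====

-- ===== VERDICT (by name: the statement is the Claim_ definition above) =====
theorem pvAlt_cons (c : Int) (rest : List Int) :
    optimal_miles_alt (c :: rest) = 2 * optimal_miles_alt rest + c := by
  simp [optimal_miles_alt, List.foldl_append]
  ring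

theorem pvLoopA_eq (l : List Int) : ∀ (j : Nat) (miles : Int),
    pvLoopA l j miles = miles + 2 ^ j * optimal_miles_alt l := by
  induction l with
  | nil => intro j miles; simp [pvLoopA, optimal_miles_alt]
  | cons c rest ih =>
    intro j miles
    rw [pvLoopA, ih, pvAlt_cons, pow_succ]
    ring

theorem optimal_miles_spec : Claim_equal_optimal_miles := by
  intro calories _
  show optimal_miles calories = optimal_miles_alt calories
  rw [optimal_miles, pvLoopA_eq]
  ring
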